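-- pv_equiv track=rewrite | github.com/Lukas-Les/advent-of-code | 2023/python/9/part_1.py | make_arr_of_diffs
-- ===== SOURCE A (Python) =====
-- def make_arr_of_diffs(arr):
--     last_arr = arr[-1]
--     if not any(last_arr):
--         return arr
--     new_arr = []
--     for i in range(len(last_arr) - 1):
--         new_arr.append(last_arr[i + 1] - last_arr[i])
--     arr.append(new_arr)
--     return make_arr_of_diffs(arr)
-- ===== SOURCE B (Python) =====
-- def make_arr_of_diffs(arr):
--     # NOTE: like A, mutates arr in place (appends rows) and returns the same object.
--     last = arr[-1]
--     while any(last):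
--         last = [b - a for a, b in zip(last, last[1:])]
--         arr.append(last)
--     return arr
-- ===== Notes on version B (the rewrite author's own statement) =====
-- stated objective: simpler
-- what changed: Replaces the tail recursion that re-reads arr[-1] and builds each difference row with an index loop by a while loop that carries the current row in a variable and computes the next row with a zip comprehension.
import Mathlib
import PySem

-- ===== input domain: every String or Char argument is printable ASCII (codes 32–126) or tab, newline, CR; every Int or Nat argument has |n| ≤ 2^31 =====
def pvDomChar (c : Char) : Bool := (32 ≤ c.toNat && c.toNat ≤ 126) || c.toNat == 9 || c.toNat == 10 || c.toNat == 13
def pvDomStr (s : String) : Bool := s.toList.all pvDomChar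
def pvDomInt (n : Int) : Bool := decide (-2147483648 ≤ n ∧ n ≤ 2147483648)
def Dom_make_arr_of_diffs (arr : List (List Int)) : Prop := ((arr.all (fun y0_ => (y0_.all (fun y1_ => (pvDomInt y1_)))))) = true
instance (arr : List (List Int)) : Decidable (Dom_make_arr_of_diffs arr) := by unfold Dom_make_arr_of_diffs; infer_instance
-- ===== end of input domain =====

-- B replaces A's tail recursion (re-reading arr[-1], index loop for the diffs) by a while loop
-- carrying the current row and a zip comprehension; both mutate arr in place in Python, the
-- equivalence proved here is about the return value.

-- ===== PORT A =====
-- length of A's new_arr, needed for the termination measure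
theorem pvA_newArr_length (l : List Int) :
    ((PySem.List.pyRange 0 ((l.length : Int) - 1) 1).foldl
      (fun acc i => acc ++ [PySem.List.pyGetD l (i + 1) 0 - PySem.List.pyGetD l i 0]) []).length
      = ((l.length : Int) - 1).toNat := by
  rw [PySem.List.foldl_append_singleton_eq_map, List.nil_append, List.length_map,
    PySem.List.length_pyRange_one]
  simp

def make_arr_of_diffs (arr : List (List Int)) : List (List Int) :=
  match h : PySem.List.pyGet? arr (-1) with
  | none => arr        -- Python raises IndexError here (arr == []); excluded by Pre_
  | some last_arr =>
    if hz : last_arr.any (fun x => x != 0) then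
      let new_arr := (PySem.List.pyRange 0 ((last_arr.length : Int) - 1) 1).foldl
        (fun acc i => acc ++ [PySem.List.pyGetD last_arr (i + 1) 0 - PySem.List.pyGetD last_arr i 0]) []
      make_arr_of_diffs (arr ++ [new_arr])
    else arr
termination_by (PySem.List.pyGet? arr (-1)).elim 0 List.length
decreasing_by
  simp only [PySem.List.pyGet?_neg_one, List.getLast?_concat, Option.elim_some, h,
    pvA_newArr_length]
  have : last_arr ≠ [] := by
    rcases List.any_eq_true.mp hz with ⟨x, hx, _⟩
    exact List.ne_nil_of_mem hx
  have : 0 < last_arr.length := List.length_pos_iff.mpr this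
  omega

-- ===== PORT B =====
-- the next difference row: [b - a for a, b in zip(last, last[1:])]
def pvDiffRow (l : List Int) : List Int :=
  (l.zip (PySem.List.slice l (some 1) none)).map (fun p => p.2 - p.1)

theorem pvDiffRow_length (l : List Int) : (pvDiffRow l).length = l.length - 1 := by
  simp [pvDiffRow, PySem.List.slice_from_one]

-- the rows appended by B's while loop, starting from row `last`
def pvLoopRows (last : List Int) : List (List Int) :=
  if last.any (fun x => x != 0) then
    pvDiffRow last :: pvLoopRows (pvDiffRow last)
  else []
termination_by last.length
decreasing_by
  rename_i hz
  rw [pvDiffRow_length]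
  rcases List.any_eq_true.mp hz with ⟨x, hx, _⟩
  have := List.length_pos_iff.mpr (List.ne_nil_of_mem hx)
  omega

def make_arr_of_diffs_alt (arr : List (List Int)) : List (List Int) :=
  match PySem.List.pyGet? arr (-1) with
  | none => arr        -- Python raises IndexError here (arr == []); excluded by Pre_
  | some last => arr ++ pvLoopRows last

-- ===== PRECONDITION & SPEC =====
-- Pre_ excludes only the empty list, on which both Pythons raise IndexError at arr[-1].
def Pre_make_arr_of_diffs (arr : List (List Int)) : Prop := arr ≠ []
instance (arr : List (List Int)) : Decidable (Pre_make_arr_of_diffs arr) := by unfold Pre_make_arr_of_diffs; infer_instance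
def pvWitness_make_arr_of_diffs : List (List Int) := [[1, 4, 9]]

def Spec_make_arr_of_diffs (arr : List (List Int)) (out : List (List Int)) : Prop := out = make_arr_of_diffs_alt arr
instance (arr : List (List Int)) (out : List (List Int)) : Decidable (Spec_make_arr_of_diffs arr out) := by unfold Spec_make_arr_of_diffs; infer_instance

-- ===== CLAIM (what is proved, stated in full; the proofs are below) =====
def Claim_equal_make_arr_of_diffs : Prop := ∀ (arr : List (List Int)), Dom_make_arr_of_diffs arr → Pre_make_arr_of_diffs arr → Spec_make_arr_of_diffs arr (make_arr_of_diffs arr)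

-- ===== LEMMAS AND PROOFS =====

-- A's inner index loop builds exactly B's zip-comprehension row
theorem pvA_newArr_eq_diffRow (l : List Int) :
    (PySem.List.pyRange 0 ((l.length : Int) - 1) 1).foldl
      (fun acc i => acc ++ [PySem.List.pyGetD l (i + 1) 0 - PySem.List.pyGetD l i 0]) []
      = pvDiffRow l := by
  rw [PySem.List.foldl_append_singleton_eq_map]
  apply List.ext_getElem
  · rw [List.nil_append, List.length_map, PySem.List.length_pyRange_one, pvDiffRow_length]; omega
  · intro k h1 h2
    have hk : k < l.length - 1 := by
      simpa [PySem.List.length_pyRange_one] using h1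
    have hr : k < (PySem.List.pyRange 0 ((l.length : Int) - 1) 1).length := by
      simpa using h1
    have hgr : (PySem.List.pyRange 0 ((l.length : Int) - 1) 1)[k]'hr = (0 : Int) + k :=
      PySem.List.getElem_pyRange_one 0 ((l.length : Int) - 1) k hr
    simp only [List.nil_append, List.getElem_map, hgr, zero_add]
    have e1 : ((k : Int) + 1) = ((k + 1 : Nat) : Int) := by push_cast; ring
    rw [e1, PySem.List.pyGetD_natCast, PySem.List.pyGetD_natCast]
    have hk1 : k + 1 < l.length := by omega
    rw [List.getD_eq_getElem l 0 hk1, List.getD_eq_getElem l 0 (by omega)]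
    simp [pvDiffRow, PySem.List.slice_from_one, List.getElem_zip]

-- the main invariant: A's recursion equals arr ++ B's loop rows
theorem pvMain (n : ℕ) (last : List Int) (hn : last.length ≤ n) (arr : List (List Int))
    (h : PySem.List.pyGet? arr (-1) = some last) :
    make_arr_of_diffs arr = arr ++ pvLoopRows last := by
  induction n generalizing last arr with
  | zero =>
    have : last = [] := List.eq_nil_of_length_eq_zero (by omega)
    subst this
    rw [make_arr_of_diffs, h, pvLoopRows]
    simp
  | succ n ih =>
    rw [make_arr_of_diffs, h, pvLoopRows]
    by_cases hz : last.any (fun x => x != 0)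
    · simp only [hz, dif_pos, if_pos]
      rw [pvA_newArr_eq_diffRow]
      have hne : last ≠ [] := by
        rcases List.any_eq_true.mp hz with ⟨x, hx, _⟩
        exact List.ne_nil_of_mem hx
      have hlen : (pvDiffRow last).length ≤ n := by
        have := List.length_pos_iff.mpr hne
        rw [pvDiffRow_length]; omega
      have h2 : PySem.List.pyGet? (arr ++ [pvDiffRow last]) (-1) = some (pvDiffRow last) := by
        rw [PySem.List.pyGet?_neg_one, List.getLast?_concat]
      rw [ih (pvDiffRow last) hlen (arr ++ [pvDiffRow last]) h2]
      simp
    · simp [hz]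

-- ===== VERDICT (by name: the statement is the Claim_ definition above) =====
theorem make_arr_of_diffs_spec : Claim_equal_make_arr_of_diffs := by
  intro arr _ hpre
  unfold Spec_make_arr_of_diffs make_arr_of_diffs_alt
  cases h : PySem.List.pyGet? arr (-1) with
  | none =>
    rw [PySem.List.pyGet?_neg_one] at h
    exact absurd (List.getLast?_eq_none_iff.mp h) hpre
  | some last => exact pvMain last.length last le_rfl arr h
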